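-- pv_equiv track=rewrite | github.com/PetrDoroshev/NLP | paragraph_processing.py | merge_paragraphs
-- ===== SOURCE A (Python) =====
-- def merge_paragraphs(paragraphs):
--     merged_paragraphs = []
--     i = 0
--     n = len(paragraphs)
--
--     while i < n:
--         current = paragraphs[i]
--         # Пока текущая строка заканчивается на '-' и есть следующая строка
--         while (current.endswith('-')) and i + 1 < n:
--             i += 1
--             next_paragraph = paragraphs[i]
--             current = current[:-1] + next_paragraph
--         merged_paragraphs.append(current)
--         i += 1
--
--     return merged_paragraphs
-- ===== SOURCE B (Python) =====
-- def merge_paragraphs(paragraphs):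
--     merged = []
--     current = ""
--     started = False
--     for p in paragraphs:
--         if not started:
--             current = p
--             started = True
--         elif current.endswith('-'):
--             current = current[:-1] + p
--         else:
--             merged.append(current)
--             current = p
--     if started:
--         merged.append(current)
--     return merged
-- ===== Notes on version B (the rewrite author's own statement) =====
-- stated objective: simpler
-- what changed: Replaced the index-driven nested while-loops with a single flat for-loop over the paragraphs that keeps a current-buffer plus a started flag and flushes the buffer when it does not end with a hyphen.
import Mathlib
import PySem

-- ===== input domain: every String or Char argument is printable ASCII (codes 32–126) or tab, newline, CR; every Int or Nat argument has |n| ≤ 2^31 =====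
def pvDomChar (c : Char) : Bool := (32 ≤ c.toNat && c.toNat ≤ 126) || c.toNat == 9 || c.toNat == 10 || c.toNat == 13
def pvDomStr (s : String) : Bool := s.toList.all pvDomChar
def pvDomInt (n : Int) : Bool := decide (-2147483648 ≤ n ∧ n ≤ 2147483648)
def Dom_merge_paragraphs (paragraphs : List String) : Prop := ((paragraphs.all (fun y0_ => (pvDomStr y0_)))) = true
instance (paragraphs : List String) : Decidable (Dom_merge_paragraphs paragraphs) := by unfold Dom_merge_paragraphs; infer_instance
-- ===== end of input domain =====

-- B replaces A's index-driven nested while-loops by one flat for-loop with a current buffer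
-- and a started flag (simpler decomposition, same single-pass cost).


-- ===== PORT A =====
-- inner while: 'while current.endswith('-') and i + 1 < n: i += 1; current = current[:-1] + paragraphs[i]'.
-- 'fuel' only makes the loop total (each step needs i + 1 < n, so n - i steps always suffice); it changes no value.
-- (paragraphs[i+1] is always in range here since i + 1 < n, so the .getD "" default is never used)
def mergeInnerA (paragraphs : List String) (n : Nat) : Nat → String → Nat → String × Nat
  | 0, current, i => (current, i)
  | fuel + 1, current, i =>
    if PySem.Str.endswith current "-" = true ∧ i + 1 < n then
      mergeInnerA paragraphs n fuel
        (PySem.Str.slice current none (some (-1)) ++ (PySem.List.pyGet? paragraphs ((i + 1 : Nat) : Int)).getD "")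
        (i + 1)
    else (current, i)

-- outer while: 'while i < n: current = paragraphs[i]; …inner…; merged_paragraphs.append(current); i += 1'.
-- 'fuel' only makes the loop total (the index grows by at least one per iteration, so n iterations always suffice).
def mergeOuterA (paragraphs : List String) (n : Nat) : Nat → List String → Nat → List String
  | 0, merged_paragraphs, _ => merged_paragraphs
  | fuel + 1, merged_paragraphs, i =>
    if i < n then
      let current := (PySem.List.pyGet? paragraphs (i : Int)).getD ""
      let r := mergeInnerA paragraphs n (n - i) current i
      mergeOuterA paragraphs n fuel (merged_paragraphs ++ [r.1]) (r.2 + 1)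
    else merged_paragraphs

def merge_paragraphs (paragraphs : List String) : List String :=
  mergeOuterA paragraphs paragraphs.length paragraphs.length [] 0

-- ===== PORT B =====
-- loop body of B's single for-loop: state = (merged, current, started)
def stepB (st : List String × String × Bool) (p : String) : List String × String × Bool :=
  if st.2.2 = false then (st.1, p, true)
  else if PySem.Str.endswith st.2.1 "-" = true then
    (st.1, PySem.Str.slice st.2.1 none (some (-1)) ++ p, true)
  else (st.1 ++ [st.2.1], p, true)

def merge_paragraphs_alt (paragraphs : List String) : List String :=
  let st := paragraphs.foldl stepB ([], "", false)
  if st.2.2 then st.1 ++ [st.2.1] else st.1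

-- ===== PRECONDITION & SPEC =====
def Spec_merge_paragraphs (paragraphs : List String) (out : List String) : Prop := out = merge_paragraphs_alt paragraphs
instance (paragraphs : List String) (out : List String) : Decidable (Spec_merge_paragraphs paragraphs out) := by unfold Spec_merge_paragraphs; infer_instance

-- ===== CLAIM (what is proved, stated in full; the proofs are below) =====
def Claim_equal_merge_paragraphs : Prop := ∀ (paragraphs : List String), Dom_merge_paragraphs paragraphs → Spec_merge_paragraphs paragraphs (merge_paragraphs paragraphs)

-- ===== LEMMAS AND PROOFS =====

-- the common mathematical shape of the merge: recursion on the remaining paragraph list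
def mergeRec (current : String) : List String → List String
  | [] => [current]
  | q :: rest =>
    if PySem.Str.endswith current "-" = true then
      mergeRec (PySem.Str.slice current none (some (-1)) ++ q) rest
    else current :: mergeRec q rest

def mergeTail : List String → List String
  | [] => []
  | p :: rest => mergeRec p rest

-- the inner while loop consumes a prefix of the remaining list
def consume (current : String) : List String → String × List String
  | [] => (current, [])
  | q :: rest =>
    if PySem.Str.endswith current "-" = true then
      consume (PySem.Str.slice current none (some (-1)) ++ q) rest
    else (current, q :: rest)

theorem mergeRec_eq_consume (l : List String) (current : String) :
    mergeRec current l = (consume current l).1 :: mergeTail (consume current l).2 := by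
  induction l generalizing current with
  | nil => simp [mergeRec, consume, mergeTail]
  | cons q rest ih =>
    by_cases hc : PySem.Chars.endswith current.toList ['-'] = true
    · simp [mergeRec, consume, hc, ih]
    · simp [mergeRec, consume, hc, mergeTail]

-- the inner loop never moves the index backwards
theorem innerA_snd_ge (paragraphs : List String) (n fuel : Nat) (current : String) (i : Nat) :
    i ≤ (mergeInnerA paragraphs n fuel current i).2 := by
  induction fuel generalizing current i with
  | zero => exact le_refl i
  | succ fuel ih =>
    by_cases hc : PySem.Str.endswith current "-" = true ∧ i + 1 < n
    · rw [mergeInnerA, if_pos hc]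
      exact le_trans (Nat.le_succ i) (ih _ _)
    · rw [mergeInnerA, if_neg hc]

theorem innerA_spec (paragraphs : List String) (fuel : Nat) (current : String) (i : Nat)
    (hn : i < paragraphs.length) (hfuel : paragraphs.length ≤ i + fuel) :
    (mergeInnerA paragraphs paragraphs.length fuel current i).1
        = (consume current (paragraphs.drop (i + 1))).1 ∧
    paragraphs.drop ((mergeInnerA paragraphs paragraphs.length fuel current i).2 + 1)
        = (consume current (paragraphs.drop (i + 1))).2 ∧
    (mergeInnerA paragraphs paragraphs.length fuel current i).2 < paragraphs.length := by
  induction fuel generalizing current i with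
  | zero => omega
  | succ fuel ih =>
    by_cases hc : PySem.Str.endswith current "-" = true ∧ i + 1 < paragraphs.length
    · rw [mergeInnerA, if_pos hc]
      have hi' : i + 1 < paragraphs.length := hc.2
      have hc1 : PySem.Chars.endswith current.toList ['-'] = true := by simpa using hc.1
      have hdrop : paragraphs.drop (i + 1) = paragraphs[i + 1] :: paragraphs.drop (i + 1 + 1) :=
        List.drop_eq_getElem_cons hi'
      have hnx : (PySem.List.pyGet? paragraphs ((i + 1 : Nat) : Int)).getD "" = paragraphs[i + 1] := by
        rw [PySem.List.pyGet?_natCast]; simp [List.getElem?_eq_getElem hi']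
      obtain ⟨h1, h2, h3⟩ := ih _ (i + 1) hi' (by omega)
      rw [hnx, hdrop]
      exact ⟨by rw [h1]; simp [consume, hc1], by rw [h2]; simp [consume, hc1], h3⟩
    · rw [mergeInnerA, if_neg hc]
      rcases Decidable.not_and_iff_not_or_not.mp hc with h | h
      · have h' : ¬ PySem.Chars.endswith current.toList ['-'] = true := by simpa using h
        cases hdrop : paragraphs.drop (i + 1) with
        | nil => simp [consume, hn]
        | cons q r => simp [consume, h', hn]
      · have hdrop : paragraphs.drop (i + 1) = [] := List.drop_eq_nil_of_le (by omega)
        simp [consume, hdrop, hn]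

theorem outerA_spec (paragraphs : List String) (fuel : Nat) (acc : List String) (i : Nat)
    (hfuel : paragraphs.length ≤ i + fuel) :
    mergeOuterA paragraphs paragraphs.length fuel acc i = acc ++ mergeTail (paragraphs.drop i) := by
  induction fuel generalizing acc i with
  | zero =>
    have hdrop : paragraphs.drop i = [] := List.drop_eq_nil_of_le (by omega)
    simp [mergeOuterA, hdrop, mergeTail]
  | succ fuel ih =>
    rw [mergeOuterA]
    by_cases h : i < paragraphs.length
    · rw [if_pos h]
      obtain ⟨h1, h2, _⟩ :=
        innerA_spec paragraphs (paragraphs.length - i)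
          ((PySem.List.pyGet? paragraphs (i : Int)).getD "") i h (by omega)
      have hge := innerA_snd_ge paragraphs paragraphs.length (paragraphs.length - i)
        ((PySem.List.pyGet? paragraphs (i : Int)).getD "") i
      have hcur : (PySem.List.pyGet? paragraphs (i : Int)).getD "" = paragraphs[i] := by
        rw [PySem.List.pyGet?_natCast]; simp [List.getElem?_eq_getElem h]
      have hdrop : paragraphs.drop i = paragraphs[i] :: paragraphs.drop (i + 1) :=
        List.drop_eq_getElem_cons h
      rw [ih _ _ (by omega), hdrop, mergeTail, mergeRec_eq_consume, ← hcur, ← h1, ← h2]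
      simp
    · rw [if_neg h]
      have hdrop : paragraphs.drop i = [] := List.drop_eq_nil_of_le (by omega)
      simp [hdrop, mergeTail]

theorem foldB_spec (l : List String) (current : String) (acc : List String) :
    (if (l.foldl stepB (acc, current, true)).2.2
      then (l.foldl stepB (acc, current, true)).1 ++ [(l.foldl stepB (acc, current, true)).2.1]
      else (l.foldl stepB (acc, current, true)).1) = acc ++ mergeRec current l := by
  induction l generalizing current acc with
  | nil => simp [mergeRec]
  | cons q rest ih =>
    by_cases hc : PySem.Chars.endswith current.toList ['-'] = true
    · simp [List.foldl_cons, stepB, hc, mergeRec, ih]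
    · simp [List.foldl_cons, stepB, hc, mergeRec, ih]

theorem alt_eq_mergeTail (paragraphs : List String) :
    merge_paragraphs_alt paragraphs = mergeTail paragraphs := by
  cases paragraphs with
  | nil => simp [merge_paragraphs_alt, mergeTail]
  | cons p rest =>
    have h0 : stepB ([], "", false) p = ([], p, true) := by simp [stepB]
    simpa [merge_paragraphs_alt, List.foldl_cons, h0, mergeTail] using foldB_spec rest p []

-- ===== VERDICT (by name: the statement is the Claim_ definition above) =====
theorem merge_paragraphs_spec : Claim_equal_merge_paragraphs := by
  intro paragraphs _
  unfold Spec_merge_paragraphs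
  rw [alt_eq_mergeTail, merge_paragraphs, outerA_spec paragraphs paragraphs.length [] 0 (by omega)]
  simp
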